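-- pv_equiv track=rewrite | github.com/SnehaBP/LeetCode | 2119-a-number-after-a-double-reversal/2119-a-number-after-a-double-reversal.py | isSameAfterReversals
-- ===== SOURCE A (Python) =====
-- def isSameAfterReversals(num):
--     """
--     :type num: int
--     :rtype: bool
--     """
--     def toReverse(x):
--         rev=0
--         while x>0:
--             digit=x%10
--             rev=(rev*10)+digit
--             x=x//10
--         return rev
--     reversed1=toReverse(num)
--     reversed2=toReverse(reversed1)
--     return reversed2==num
-- ===== SOURCE B (Python) =====
-- def isSameAfterReversals(num):
--     """
--     :type num: int
--     :rtype: bool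
--     """
--     return num == 0 or (num > 0 and num % 10 != 0)
-- ===== Notes on version B (the rewrite author's own statement) =====
-- stated objective: simpler
-- what changed: Replaced the two digit-reversal loops with the closed-form test: the double reversal preserves num exactly when num is 0 or positive with no trailing zero (negatives reverse to 0 in A and so always return False).
import Mathlib
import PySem

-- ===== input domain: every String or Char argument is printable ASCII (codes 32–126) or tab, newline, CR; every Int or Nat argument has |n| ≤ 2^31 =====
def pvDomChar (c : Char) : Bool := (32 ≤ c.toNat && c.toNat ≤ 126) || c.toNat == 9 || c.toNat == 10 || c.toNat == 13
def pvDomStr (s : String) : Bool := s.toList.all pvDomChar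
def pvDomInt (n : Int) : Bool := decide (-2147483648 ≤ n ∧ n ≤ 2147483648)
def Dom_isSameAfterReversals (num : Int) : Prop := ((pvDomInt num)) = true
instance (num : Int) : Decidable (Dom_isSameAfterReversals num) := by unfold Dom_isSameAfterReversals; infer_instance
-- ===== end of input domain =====

-- B replaces A's two digit-reversal loops with a closed-form trailing-zero test (simpler, no loop).

-- ===== PORT A =====
-- the 'while x > 0' loop of A's inner helper toReverse, with state (x, rev)
def toReverseLoop (x rev : Int) : Int :=
  if h : x > 0 then
    toReverseLoop (PySem.Int.floordiv x 10) (rev * 10 + PySem.Int.mod x 10)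
  else rev
termination_by x.toNat
decreasing_by
  have h10 : (0:Int) < 10 := by norm_num
  rw [PySem.Int.floordiv_eq_ediv_of_pos h10]
  omega

def toReverse (x : Int) : Int := toReverseLoop x 0

def isSameAfterReversals (num : Int) : Bool :=
  let reversed1 := toReverse num
  let reversed2 := toReverse reversed1
  reversed2 == num

-- ===== PORT B =====
def isSameAfterReversals_alt (num : Int) : Bool :=
  num == 0 || (decide (num > 0) && PySem.Int.mod num 10 != 0)

-- ===== PRECONDITION & SPEC =====
def Spec_isSameAfterReversals (num : Int) (out : Bool) : Prop := out = isSameAfterReversals_alt num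
instance (num : Int) (out : Bool) : Decidable (Spec_isSameAfterReversals num out) := by unfold Spec_isSameAfterReversals; infer_instance

-- ===== CLAIM (what is proved, stated in full; the proofs are below) =====
def Claim_equal_isSameAfterReversals : Prop := ∀ (num : Int), Dom_isSameAfterReversals num → Spec_isSameAfterReversals num (isSameAfterReversals num)

-- ===== LEMMAS AND PROOFS =====

-- the mathematical reversal: digits of n, most significant first
def revNat (n : Nat) : Nat := Nat.ofDigits 10 (Nat.digits 10 n).reverse

theorem toReverseLoop_nonpos {x rev : Int} (h : ¬ x > 0) : toReverseLoop x rev = rev := by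
  rw [toReverseLoop]; simp [h]

-- loop invariant: on a natural-number input the loop computes acc·10^len + revNat n
theorem toReverseLoop_nat (n : Nat) (acc : Int) :
    toReverseLoop (n : Int) acc = acc * 10 ^ (Nat.digits 10 n).length + (revNat n : Int) := by
  induction n using Nat.strong_induction_on generalizing acc with
  | _ n ih =>
    by_cases hn : 0 < n
    · rw [toReverseLoop]
      have hx : ((n : Int) > 0) := by exact_mod_cast hn
      simp only [hx, dite_true]
      have hfd : PySem.Int.floordiv (n : Int) 10 = ((n / 10 : Nat) : Int) := by
        exact_mod_cast PySem.Int.floordiv_natCast n 10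
      have hmd : PySem.Int.mod (n : Int) 10 = ((n % 10 : Nat) : Int) := by
        exact_mod_cast PySem.Int.mod_natCast n 10
      rw [hfd, hmd]
      rw [ih (n / 10) (Nat.div_lt_self hn (by norm_num)) _]
      have hdig : Nat.digits 10 n = n % 10 :: Nat.digits 10 (n / 10) :=
        Nat.digits_def' (by norm_num) hn
      have hrev : revNat n = revNat (n / 10) + 10 ^ (Nat.digits 10 (n / 10)).length * (n % 10) := by
        unfold revNat
        rw [hdig, List.reverse_cons, Nat.ofDigits_append]
        simp [Nat.ofDigits_singleton, List.length_reverse]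
      rw [hdig, hrev]
      push_cast
      simp [pow_succ]
      ring
    · have hn0 : n = 0 := by omega
      subst hn0
      rw [toReverseLoop_nonpos (by norm_num)]
      simp [revNat]

theorem toReverse_natCast (n : Nat) : toReverse (n : Int) = (revNat n : Int) := by
  unfold toReverse
  rw [toReverseLoop_nat]
  ring

-- a positive number's reversal is positive and has a nonzero last digit (its leading digit)
theorem revNat_pos {n : Nat} (hn : 0 < n) : 0 < revNat n ∧ revNat n % 10 ≠ 0 := by
  have hne : Nat.digits 10 n ≠ [] := Nat.digits_ne_nil_iff_ne_zero.mpr (by omega)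
  have hlast := Nat.getLast_digit_ne_zero 10 (show n ≠ 0 by omega)
  have hsplit : (Nat.digits 10 n).reverse
      = (Nat.digits 10 n).getLast hne :: (Nat.digits 10 n).dropLast.reverse := by
    conv_lhs => rw [← List.dropLast_append_getLast hne]
    simp
  have hlt : (Nat.digits 10 n).getLast hne < 10 :=
    Nat.digits_lt_base (by norm_num) (List.getLast_mem hne)
  unfold revNat
  rw [hsplit, Nat.ofDigits_cons]
  constructor
  · omega
  · omega

-- the characterisation: double reversal fixes n iff n has no trailing zero
theorem revNat_revNat_eq {n : Nat} (hn : 0 < n) (h10 : n % 10 ≠ 0) : revNat (revNat n) = n := by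
  unfold revNat
  have hne : Nat.digits 10 n ≠ [] := Nat.digits_ne_nil_iff_ne_zero.mpr (by omega)
  have hdig : Nat.digits 10 (Nat.ofDigits 10 (Nat.digits 10 n).reverse) = (Nat.digits 10 n).reverse := by
    apply Nat.digits_ofDigits 10 (by norm_num)
    · intro d hd
      exact Nat.digits_lt_base (by norm_num) (List.mem_reverse.mp hd)
    · intro hrevne
      have hd : Nat.digits 10 n = n % 10 :: Nat.digits 10 (n / 10) :=
        Nat.digits_def' (by norm_num) hn
      simp only [List.getLast_reverse, hd, List.head_cons]
      exact h10
  rw [hdig, List.reverse_reverse]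
  exact Nat.ofDigits_digits 10 n

theorem revNat_revNat_ne {n : Nat} (hn : 0 < n) (h10 : n % 10 = 0) : revNat (revNat n) ≠ n := by
  have h1 := revNat_pos hn
  have h2 := revNat_pos h1.1
  omega

-- ===== VERDICT (by name: the statement is the Claim_ definition above) =====
theorem isSameAfterReversals_spec : Claim_equal_isSameAfterReversals := by
  intro num _
  unfold Spec_isSameAfterReversals isSameAfterReversals isSameAfterReversals_alt
  by_cases hpos : 0 < num
  · -- positive: reduce to the Nat characterisation
    obtain ⟨n, rfl⟩ : ∃ n : Nat, num = (n : Int) := ⟨num.toNat, (Int.toNat_of_nonneg (le_of_lt hpos)).symm⟩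
    have hn : 0 < n := by exact_mod_cast hpos
    simp only [toReverse_natCast]
    have hmd : PySem.Int.mod (n : Int) 10 = ((n % 10 : Nat) : Int) := by
      exact_mod_cast PySem.Int.mod_natCast n 10
    rw [hmd]
    by_cases h10 : n % 10 = 0
    · have hne := revNat_revNat_ne hn h10
      simp [hne, h10, show n ≠ 0 by omega]
    · have heq := revNat_revNat_eq hn h10
      simp [heq]
      right
      refine ⟨hn, fun hdvd => h10 ?_⟩
      omega
  · -- num ≤ 0: both loops return 0 immediately
    have h1 : toReverse num = 0 := toReverseLoop_nonpos hpos
    have h2 : toReverse (0 : Int) = 0 := toReverseLoop_nonpos (by norm_num)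
    simp only [h1, h2]
    by_cases h0 : num = 0
    · simp [h0]
    · simp [h0, hpos, Ne.symm h0]
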